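-- pv_equiv track=rewrite | github.com/WilliamZhang9/waterloo_ccc | Senior/2022/Q1.py | numberWays
-- ===== SOURCE A (Python) =====
-- def numberWays(n):
--     listResult = [0] * (n + 1)
--     listResult[0] = 1
--     for i in range(4, n + 1):
--         listResult[i] += listResult[i - 4]
--     for i in range(5, n + 1):
--         listResult[i] += listResult[i - 5]
--     return listResult[n]
-- ===== SOURCE B (Python) =====
-- def numberWays(n):
--     # ways to write n = 4a + 5b  <=>  count of b in [0, n//5] with b ≡ n (mod 4)
--     m = n // 5
--     r = n % 4
--     return (m - r) // 4 + 1 if r <= m else 0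
-- ===== Notes on version B (the rewrite author's own statement) =====
-- stated objective: faster
-- what changed: replaces the O(n) two-pass coin-DP array with an O(1) closed-form count of b in [0, n//5] with b ≡ n (mod 4)
-- crash fix: For every n < 0 A raises IndexError (the DP array is empty); B returns 0 there. — e.g. on numberWays(-1): A raises IndexError, B returns 0
import Mathlib
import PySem

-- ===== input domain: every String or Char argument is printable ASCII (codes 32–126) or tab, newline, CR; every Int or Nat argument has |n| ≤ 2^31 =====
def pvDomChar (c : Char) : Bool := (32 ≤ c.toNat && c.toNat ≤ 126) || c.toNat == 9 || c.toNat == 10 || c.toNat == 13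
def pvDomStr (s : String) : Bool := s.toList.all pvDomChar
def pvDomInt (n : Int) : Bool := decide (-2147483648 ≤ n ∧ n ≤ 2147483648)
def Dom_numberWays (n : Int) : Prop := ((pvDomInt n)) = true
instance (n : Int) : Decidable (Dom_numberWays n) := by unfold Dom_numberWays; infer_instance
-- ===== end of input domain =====

-- B replaces A's O(n) two-pass coin DP by an O(1) closed-form count of b in [0, n//5] with b ≡ n (mod 4).

-- ===== PORT A =====
-- listResult = [0]*(n+1); listResult[0] = 1; two sequential range loops; return listResult[n].
-- The Python list is an Array here (O(1) update; same statements in the same order); every index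
-- is nonnegative and in range on Pre_ (0 ≤ n), where this is exact — listResult[0] = 1 raises
-- IndexError for n < 0, which Pre_ excludes.
def numberWays (n : Int) : Int :=
  let listResult := Array.replicate (n + 1).toNat (0 : Int)
  let listResult := listResult.setIfInBounds 0 1
  let listResult := (PySem.List.pyRange 4 (n + 1) 1).foldl
    (fun l i => l.setIfInBounds i.toNat (l.getD i.toNat 0 + l.getD (i - 4).toNat 0)) listResult
  let listResult := (PySem.List.pyRange 5 (n + 1) 1).foldl
    (fun l i => l.setIfInBounds i.toNat (l.getD i.toNat 0 + l.getD (i - 5).toNat 0)) listResult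
  listResult.getD n.toNat 0

-- ===== PORT B =====
def numberWays_alt (n : Int) : Int :=
  let m := PySem.Int.floordiv n 5
  let r := PySem.Int.mod n 4
  if r ≤ m then PySem.Int.floordiv (m - r) 4 + 1 else 0

-- ===== PRECONDITION & SPEC =====
-- Pre_ excludes n < 0, on which A raises IndexError ([0]*(n+1) is empty, so listResult[0] = 1 fails).
def Pre_numberWays (n : Int) : Prop := 0 ≤ n
instance (n : Int) : Decidable (Pre_numberWays n) := by unfold Pre_numberWays; infer_instance
def pvWitness_numberWays : Int := 9
-- For every n < 0 A raises IndexError (the DP array is empty); B returns 0 there.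
def Raises_numberWays (n : Int) : Prop := n < 0
instance (n : Int) : Decidable (Raises_numberWays n) := by unfold Raises_numberWays; infer_instance
def pvRaiseWitness_numberWays : Int := -1
def pvRaiseWitnessOut_numberWays : Int := 0
def Spec_numberWays (n : Int) (out : Int) : Prop := out = numberWays_alt n
instance (n : Int) (out : Int) : Decidable (Spec_numberWays n out) := by unfold Spec_numberWays; infer_instance

-- ===== CLAIM (what is proved, stated in full; the proofs are below) =====
def Claim_equal_numberWays : Prop := ∀ (n : Int), Dom_numberWays n → Pre_numberWays n → Spec_numberWays n (numberWays n)
def Claim_raises_numberWays : Prop := (∀ (n : Int), Dom_numberWays n → Raises_numberWays n → ¬ Pre_numberWays n) ∧ (Dom_numberWays (pvRaiseWitness_numberWays) ∧ Raises_numberWays (pvRaiseWitness_numberWays) ∧ numberWays_alt (pvRaiseWitness_numberWays) = pvRaiseWitnessOut_numberWays)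

-- ===== LEMMAS AND PROOFS =====

-- ways to pay i with coin 4 only / with coins 4 and 5
def pvW4 (i : Int) : Int := if i % 4 = 0 then 1 else 0

def pvW5 (k : Nat) : Int := pvW4 k + (if h : 5 ≤ k then pvW5 (k - 5) else 0)
termination_by k
decreasing_by omega

-- names for the intermediate arrays of port A
def pvInit (n : Int) : Array Int := (Array.replicate (n + 1).toNat (0 : Int)).setIfInBounds 0 1
def pvStep (c : Int) (l : Array Int) (i : Int) : Array Int :=
  l.setIfInBounds i.toNat (l.getD i.toNat 0 + l.getD (i - c).toNat 0)
def pvL1 (n b : Int) : Array Int := (PySem.List.pyRange 4 b 1).foldl (pvStep 4) (pvInit n)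
def pvL2 (n b : Int) : Array Int := (PySem.List.pyRange 5 b 1).foldl (pvStep 5) (pvL1 n (n + 1))

lemma pvNumberWays_eq (n : Int) : numberWays n = (pvL2 n (n + 1)).getD n.toNat 0 := rfl

lemma pvAGetD (a : Array Int) (j : Nat) (d : Int) : a.getD j d = a[j]?.getD d := by
  unfold Array.getD
  by_cases h : j < a.size
  · simp [h]
  · simp [h]

lemma pvGetD_set (a : Array Int) (i j : Nat) (v d : Int) (hi : i < a.size) :
    (a.setIfInBounds i v).getD j d = if j = i then v else a.getD j d := by
  rw [pvAGetD, pvAGetD, Array.getElem?_setIfInBounds]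
  by_cases h : j = i
  · simp [h, hi]
  · simp [h, Ne.symm h]

lemma pvGetD_replicate (N j : Nat) : (Array.replicate N (0 : Int)).getD j 0 = 0 := by
  rw [pvAGetD, Array.getElem?_replicate]
  by_cases h : j < N <;> simp [h]

lemma pvLen_foldl (c : Int) (is : List Int) (l : Array Int) :
    (is.foldl (pvStep c) l).size = l.size := by
  induction is generalizing l with
  | nil => rfl
  | cons x xs ih => simp [List.foldl, pvStep, ih, Array.size_setIfInBounds]

lemma pvW4_sub_four (b : Int) : pvW4 (b - 4) = pvW4 b := by
  unfold pvW4
  by_cases h : b % 4 = 0 <;> simp [h, show (b - 4) % 4 = b % 4 by omega]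

lemma pvL1_size (n b : Int) : (pvL1 n b).size = (n + 1).toNat := by
  simp [pvL1, pvLen_foldl, pvInit, Array.size_setIfInBounds]

lemma pvL1_getD (n : Int) (hn : 0 ≤ n) :
    ∀ b : Int, 4 ≤ b → b ≤ n + 1 →
    ∀ j : Nat, (j : Int) ≤ n →
      (pvL1 n b).getD j 0
        = if (j : Int) < b then pvW4 j else (if j = 0 then 1 else 0) := by
  intro b hb4
  induction b, hb4 using Int.le_induction with
  | base =>
    intro _ j hj
    have hr : PySem.List.pyRange 4 4 1 = [] := PySem.List.pyRange_one_eq_nil (by omega)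
    simp only [pvL1, hr, List.foldl_nil, pvInit]
    rw [pvGetD_set _ _ _ _ _ (by simp only [Array.size_replicate]; omega)]
    rw [pvGetD_replicate]
    by_cases h0 : j = 0
    · subst h0; norm_num [pvW4]
    · by_cases hlt : (j : Int) < 4
      · have hne : ¬ (j : Int) % 4 = 0 := by omega
        simp [h0, hlt, pvW4, hne]
      · simp [h0, hlt]
  | succ b hb ih =>
    intro hble j hj
    have hrange : PySem.List.pyRange 4 (b + 1) 1 = PySem.List.pyRange 4 b 1 ++ [b] :=
      PySem.List.pyRange_one_succ_right (by omega)
    have hfold : pvL1 n (b + 1) = pvStep 4 (pvL1 n b) b := by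
      simp [pvL1, hrange, List.foldl_append]
    have hblen : b.toNat < (pvL1 n b).size := by rw [pvL1_size]; omega
    have hbn : ((b.toNat : Nat) : Int) = b := by omega
    have hread_b : (pvL1 n b).getD b.toNat 0 = 0 := by
      have h := ih (by omega) b.toNat (by omega)
      rw [hbn] at h
      rw [h]
      simp [show ¬ b.toNat = 0 by omega]
    have hread_b4 : (pvL1 n b).getD (b - 4).toNat 0 = pvW4 (b - 4) := by
      have h4 : (((b - 4).toNat : Nat) : Int) = b - 4 := by omega
      have h := ih (by omega) (b - 4).toNat (by omega)
      rw [h4] at h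
      rw [h, if_pos (by omega)]
    rw [hfold]
    unfold pvStep
    rw [hread_b, hread_b4, zero_add]
    rw [pvGetD_set _ _ _ _ _ hblen]
    by_cases hjb : j = b.toNat
    · subst hjb
      rw [if_pos rfl, if_pos (by omega), pvW4_sub_four, hbn]
    · have h1 : ((j : Int) < b + 1) ↔ ((j : Int) < b) := by omega
      rw [if_neg hjb]
      simp only [h1]
      exact ih (by omega) j hj
  
lemma pvL2_size (n b : Int) : (pvL2 n b).size = (n + 1).toNat := by
  simp [pvL2, pvLen_foldl, pvL1_size]

lemma pvW5_lt_five (k : Nat) (h : k < 5) : pvW5 k = pvW4 k := by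
  rw [pvW5]; simp [show ¬ 5 ≤ k by omega]

lemma pvL2_getD (n : Int) (hn : 4 ≤ n) :
    ∀ b : Int, 5 ≤ b → b ≤ n + 1 →
    ∀ j : Nat, (j : Int) ≤ n →
      (pvL2 n b).getD j 0 = if (j : Int) < b then pvW5 j else pvW4 j := by
  intro b hb5
  induction b, hb5 using Int.le_induction with
  | base =>
    intro _ j hj
    have hr : PySem.List.pyRange 5 5 1 = [] := PySem.List.pyRange_one_eq_nil (by omega)
    simp only [pvL2, hr, List.foldl_nil]
    rw [pvL1_getD n (by omega) (n + 1) (by omega) (by omega) j hj]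
    by_cases h5 : (j : Int) < 5
    · rw [if_pos (show (j : Int) < n + 1 by omega), if_pos h5, pvW5_lt_five j (by omega)]
    · rw [if_pos (show (j : Int) < n + 1 by omega), if_neg h5]
  | succ b hb ih =>
    intro hble j hj
    have hrange : PySem.List.pyRange 5 (b + 1) 1 = PySem.List.pyRange 5 b 1 ++ [b] :=
      PySem.List.pyRange_one_succ_right (by omega)
    have hfold : pvL2 n (b + 1) = pvStep 5 (pvL2 n b) b := by
      simp [pvL2, hrange, List.foldl_append]
    have hblen : b.toNat < (pvL2 n b).size := by rw [pvL2_size]; omega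
    have hbn : ((b.toNat : Nat) : Int) = b := by omega
    have hread_b : (pvL2 n b).getD b.toNat 0 = pvW4 b := by
      have h := ih (by omega) b.toNat (by omega)
      rw [hbn] at h
      rw [h, if_neg (by omega)]
    have hread_b5 : (pvL2 n b).getD (b - 5).toNat 0 = pvW5 (b - 5).toNat := by
      have h5 : (((b - 5).toNat : Nat) : Int) = b - 5 := by omega
      have h := ih (by omega) (b - 5).toNat (by omega)
      rw [h5] at h
      rw [h, if_pos (by omega)]
    rw [hfold]
    unfold pvStep
    rw [hread_b, hread_b5]
    rw [pvGetD_set _ _ _ _ _ hblen]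
    by_cases hjb : j = b.toNat
    · subst hjb
      rw [if_pos rfl, if_pos (by omega)]
      conv_rhs => rw [pvW5]
      rw [dif_pos (show 5 ≤ b.toNat by omega), hbn, show b.toNat - 5 = (b - 5).toNat by omega]
    · have h1 : ((j : Int) < b + 1) ↔ ((j : Int) < b) := by omega
      rw [if_neg hjb]
      simp only [h1]
      exact ih (by omega) j hj

lemma pvW5_closed (k : Nat) :
    pvW5 k = if (k : Int) % 4 ≤ (k : Int) / 5 then ((k : Int) / 5 - (k : Int) % 4) / 4 + 1 else 0 := by
  induction k using Nat.strong_induction_on with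
  | _ k ih =>
    rw [pvW5]
    unfold pvW4
    by_cases h5 : 5 ≤ k
    · rw [dif_pos h5, ih (k - 5) (by omega)]
      split_ifs <;> omega
    · rw [dif_neg h5]
      split_ifs <;> omega

lemma pvAlt_closed (n : Int) :
    numberWays_alt n = if n % 4 ≤ n / 5 then (n / 5 - n % 4) / 4 + 1 else 0 := by
  have h5 : PySem.Int.floordiv n 5 = n / 5 := PySem.Int.floordiv_eq_ediv_of_pos (by omega)
  have h4 : PySem.Int.mod n 4 = n % 4 := PySem.Int.mod_eq_emod_of_pos (by omega)
  have h44 : ∀ a : Int, PySem.Int.floordiv a 4 = a / 4 :=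
    fun a => PySem.Int.floordiv_eq_ediv_of_pos (by omega)
  simp only [numberWays_alt, h5, h4, h44]

-- ===== VERDICT (by name: the statement is the Claim_ definition above) =====
theorem numberWays_spec : Claim_equal_numberWays := by
  unfold Claim_equal_numberWays
  intro n _ hn
  unfold Pre_numberWays at hn
  unfold Spec_numberWays
  by_cases hsmall : n < 4
  · interval_cases n <;> decide
  · have hsmall' : 4 ≤ n := by omega
    have hjn : ((n.toNat : Nat) : Int) = n := by omega
    have h := pvL2_getD n hsmall' (n + 1) (by omega) le_rfl n.toNat (by omega)
    rw [hjn] at h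
    rw [pvNumberWays_eq, h, if_pos (by omega), pvW5_closed, pvAlt_closed n, hjn]

@[simp]
theorem numberWays_raises : Claim_raises_numberWays := by
  unfold Claim_raises_numberWays
  exact ⟨fun n _ h => by unfold Raises_numberWays Pre_numberWays at *; omega, by decide⟩
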